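-- pv_equiv track=rewrite | github.com/gummadiprathyusha5-hash/self-healing-biopolymer-film-using-natural-materials-prediction-system | app.py | find_best_combination
-- ===== SOURCE A (Python) =====
-- def calculate_efficiency(chitosan, gelatin, starch, aloe, glycerol, temperature, humidity):
--     efficiency = 60
--
--     if chitosan > 30:
--         efficiency += 10
--     if aloe > 10:
--         efficiency += 8
--     if 35 <= temperature <= 45:
--         efficiency += 10
--     if humidity > 70:
--         efficiency -= 5
--
--     return efficiency
--
-- def find_best_combination(temperature, humidity):
--     best_score = -1
--     best_mix = None
--
--     # try many combinations (kept small so it runs fast)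
--     for chitosan in range(20, 51, 5):
--         for gelatin in range(10, 41, 5):
--             for starch in range(10, 41, 5):
--                 aloe = 10
--                 glycerol = 10
--
--                 total = chitosan + gelatin + starch + aloe + glycerol
--
--                 if total == 100:
--                     score = calculate_efficiency(
--                         chitosan, gelatin, starch, aloe, glycerol,
--                         temperature, humidity
--                     )
--
--                     if score > best_score:
--                         best_score = score
--                         best_mix = (chitosan, gelatin, starch, aloe, glycerol)
--
--     return best_mix, best_score
-- ===== SOURCE B (Python) =====
-- def calculate_efficiency(chitosan, gelatin, starch, aloe, glycerol, temperature, humidity):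
--     efficiency = 60
--     if chitosan > 30:
--         efficiency += 10
--     if aloe > 10:
--         efficiency += 8
--     if 35 <= temperature <= 45:
--         efficiency += 10
--     if humidity > 70:
--         efficiency -= 5
--     return efficiency
--
-- def find_best_combination(temperature, humidity):
--     # Stage 1: enumerate the feasible mixes by solving total==100 for starch.
--     # Stage 2: pick the first highest-scoring mix with max(key=...).
--     candidates = [
--         (c, g, 80 - c - g, 10, 10)
--         for c in range(20, 51, 5)
--         for g in range(10, 41, 5)
--         if 10 <= 80 - c - g <= 40
--     ]
--     if not candidates:
--         return None, -1
--     key = lambda m: calculate_efficiency(*m, temperature, humidity)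
--     best = max(candidates, key=key)
--     return best, key(best)
-- ===== Notes on version B (the rewrite author's own statement) =====
-- stated objective: simpler
-- what changed: Replaces the triple nested accumulator loop by a two-stage pipeline: a comprehension that solves total==100 for starch to list the feasible mixes, then the built-in max with a score key (Python's max keeps the first maximal element, matching A's strict '>' tie-break).
import Mathlib
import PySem

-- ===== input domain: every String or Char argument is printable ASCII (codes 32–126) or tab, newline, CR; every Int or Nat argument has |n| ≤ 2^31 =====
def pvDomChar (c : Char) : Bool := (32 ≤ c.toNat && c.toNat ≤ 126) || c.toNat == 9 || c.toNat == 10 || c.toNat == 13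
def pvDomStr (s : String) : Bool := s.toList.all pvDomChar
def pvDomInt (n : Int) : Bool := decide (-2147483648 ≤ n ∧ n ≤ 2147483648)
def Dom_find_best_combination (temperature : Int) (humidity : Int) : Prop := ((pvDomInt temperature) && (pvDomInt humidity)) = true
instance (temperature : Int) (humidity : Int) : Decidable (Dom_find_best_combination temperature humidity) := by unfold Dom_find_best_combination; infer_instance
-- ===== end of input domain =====

-- B is a two-stage pipeline (list the feasible mixes by solving total==100 for starch, then max by score) replacing A's triple nested accumulator loop; return value only.
-- ===== PORT A =====
def calculate_efficiency (chitosan gelatin starch aloe glycerol temperature humidity : Int) : Int :=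
  let e : Int := 60
  let e := if chitosan > 30 then e + 10 else e
  let e := if aloe > 10 then e + 8 else e
  let e := if 35 ≤ temperature ∧ temperature ≤ 45 then e + 10 else e
  let e := if humidity > 70 then e - 5 else e
  e

def find_best_combination (temperature : Int) (humidity : Int) : (Option (Int × Int × Int × Int × Int)) × Int :=
  let st :=
    (PySem.List.pyRange 20 51 5).foldl (fun st chitosan =>
      (PySem.List.pyRange 10 41 5).foldl (fun st gelatin =>
        (PySem.List.pyRange 10 41 5).foldl (fun st starch =>
          let aloe : Int := 10
          let glycerol : Int := 10
          let total := chitosan + gelatin + starch + aloe + glycerol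
          if total = 100 then
            let score := calculate_efficiency chitosan gelatin starch aloe glycerol temperature humidity
            if score > st.1 then (score, some (chitosan, gelatin, starch, aloe, glycerol)) else st
          else st) st) st)
      ((-1 : Int), (none : Option (Int × Int × Int × Int × Int)))
  (st.2, st.1)

-- ===== PORT B =====
def find_best_combination_alt (temperature : Int) (humidity : Int) : (Option (Int × Int × Int × Int × Int)) × Int :=
  let candidates : List (Int × Int × Int × Int × Int) :=
    (PySem.List.pyRange 20 51 5).flatMap (fun c =>
      (PySem.List.pyRange 10 41 5).filterMap (fun g =>
        if 10 ≤ 80 - c - g ∧ 80 - c - g ≤ 40 then some (c, g, 80 - c - g, 10, 10) else none))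
  let key := fun (m : Int × Int × Int × Int × Int) =>
    calculate_efficiency m.1 m.2.1 m.2.2.1 m.2.2.2.1 m.2.2.2.2 temperature humidity
  -- 'if not candidates: return None, -1' + 'max(candidates, key=...)' : max? is none exactly on the empty list
  (PySem.List.max? candidates key).elim
    ((none : Option (Int × Int × Int × Int × Int)), (-1 : Int))
    (fun best => (some best, key best))

-- ===== PRECONDITION & SPEC =====
def Spec_find_best_combination (temperature : Int) (humidity : Int) (out : (Option (Int × Int × Int × Int × Int)) × Int) : Prop := out = find_best_combination_alt temperature humidity
instance (temperature : Int) (humidity : Int) (out : (Option (Int × Int × Int × Int × Int)) × Int) : Decidable (Spec_find_best_combination temperature humidity out) := by unfold Spec_find_best_combination; infer_instance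

-- ===== CLAIM =====
def Claim_equal_find_best_combination : Prop := ∀ (temperature : Int) (humidity : Int), Dom_find_best_combination temperature humidity → Spec_find_best_combination temperature humidity (find_best_combination temperature humidity)

-- ===== LEMMAS AND PROOFS =====
lemma ce_closed (c g s a gl t h : Int) :
    calculate_efficiency c g s a gl t h =
      (if c > 30 then (70 : Int) else 60) + (if a > 10 then 8 else 0)
        + (if 35 ≤ t ∧ t ≤ 45 then 10 else 0) + (if h > 70 then -5 else 0) := by
  unfold calculate_efficiency; split_ifs <;> ring

-- ===== VERDICT =====
set_option maxRecDepth 1000000 in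
set_option maxHeartbeats 2000000 in
theorem find_best_combination_spec : Claim_equal_find_best_combination := by
  intro t h _
  unfold Spec_find_best_combination
  by_cases h1 : 35 ≤ t ∧ t ≤ 45 <;> by_cases h2 : h > 70 <;>
    simp only [find_best_combination, find_best_combination_alt, ce_closed, h1, h2,
      if_true, if_false] <;> decide
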